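-- pv_equiv track=rewrite | github.com/Frazzer951/Advent-Of-Code | 2015/1/code.py | part1
-- ===== SOURCE A (Python) =====
-- def part1(input):
--     floor = 0
--
--     for c in input[0]:
--         if c == "(":
--             floor += 1
--         if c == ")":
--             floor -= 1
--     return floor
-- ===== SOURCE B (Python) =====
-- def part1(input):
--     s = input[0]
--
--     def net(lo, hi):
--         # net floor change contributed by s[lo:hi], by divide and conquer
--         if hi - lo == 0:
--             return 0
--         if hi - lo == 1:
--             c = s[lo]
--             return 1 if c == "(" else (-1 if c == ")" else 0)
--         mid = (lo + hi) // 2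
--         return net(lo, mid) + net(mid, hi)
--
--     return net(0, len(s))
-- ===== Notes on version B (the rewrite author's own statement) =====
-- stated objective: alternative
-- what changed: Replaces the left-to-right accumulator loop with a recursive divide-and-conquer over index ranges: each half's net contribution is computed independently and summed, correct because the per-character contributions are additive.
import Mathlib
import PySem

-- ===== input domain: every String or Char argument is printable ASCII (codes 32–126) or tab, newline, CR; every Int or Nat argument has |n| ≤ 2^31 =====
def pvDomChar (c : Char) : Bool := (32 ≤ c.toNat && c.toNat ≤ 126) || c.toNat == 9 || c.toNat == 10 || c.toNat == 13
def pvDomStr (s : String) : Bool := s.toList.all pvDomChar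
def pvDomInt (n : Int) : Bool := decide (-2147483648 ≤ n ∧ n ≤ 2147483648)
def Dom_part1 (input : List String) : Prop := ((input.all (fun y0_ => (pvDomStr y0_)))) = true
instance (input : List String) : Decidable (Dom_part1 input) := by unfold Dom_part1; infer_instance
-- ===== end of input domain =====

-- B computes the net floor by divide-and-conquer over the string instead of a left-to-right accumulator loop (alternative decomposition, same O(n)).
-- Pre_ excludes the empty list, on which both A and B raise IndexError at input[0].


-- ===== PORT A =====
-- loop over the characters of input[0], incrementing on '(' and decrementing on ')'
def part1 (input : List String) : Int :=
  let s := (PySem.List.pyGet? input 0).getD ""   -- input[0]; Pre_ guarantees input ≠ []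
  s.toList.foldl (fun floor c =>
    let floor := if c = '(' then floor + 1 else floor
    if c = ')' then floor - 1 else floor) 0

-- ===== PORT B =====
-- divide-and-conquer helper: net contribution of a segment (the Python recurses on index
-- ranges lo..hi of s; the port recurses on the corresponding sublist, splitting at the middle)
def part1Net (cs : List Char) : Int :=
  match cs with
  | [] => 0
  | [c] => if c = '(' then 1 else if c = ')' then -1 else 0
  | c1 :: c2 :: rest =>
    let cs' := c1 :: c2 :: rest
    let mid := cs'.length / 2
    part1Net (cs'.take mid) + part1Net (cs'.drop mid)
termination_by cs.length
decreasing_by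
  · simp [List.length_take]; omega
  · simp; omega

def part1_alt (input : List String) : Int :=
  let s := (PySem.List.pyGet? input 0).getD ""   -- input[0]; Pre_ guarantees input ≠ []
  part1Net s.toList

-- ===== PRECONDITION & SPEC =====
def Pre_part1 (input : List String) : Prop := input ≠ []
instance (input : List String) : Decidable (Pre_part1 input) := by unfold Pre_part1; infer_instance
def pvWitness_part1 : List String := ["(())("]
def Spec_part1 (input : List String) (out : Int) : Prop := out = part1_alt input
instance (input : List String) (out : Int) : Decidable (Spec_part1 input out) := by unfold Spec_part1; infer_instance

-- ===== CLAIM (what is proved, stated in full; the proofs are below) =====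
def Claim_equal_part1 : Prop := ∀ (input : List String), Dom_part1 input → Pre_part1 input → Spec_part1 input (part1 input)

-- ===== LEMMAS AND PROOFS =====

-- the divide-and-conquer helper computes (count '(') - (count ')')
lemma part1Net_eq_counts (cs : List Char) :
    part1Net cs = (cs.count '(' : Int) - (cs.count ')' : Int) := by
  induction hn : cs.length using Nat.strong_induction_on generalizing cs with
  | _ n ih =>
    match cs with
    | [] => simp [part1Net]
    | [c] =>
      by_cases h1 : c = '(' <;> by_cases h2 : c = ')' <;> simp [part1Net, h1, h2]
    | c1 :: c2 :: rest =>
      subst hn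
      have hlen : (c1 :: c2 :: rest).length ≥ 2 := by simp
      set l := c1 :: c2 :: rest with hl
      set mid := l.length / 2 with hm
      have ht : (l.take mid).length < l.length := by
        simp [List.length_take]; omega
      have hd : (l.drop mid).length < l.length := by
        simp [hl]; omega
      rw [part1Net, ih _ ht _ rfl, ih _ hd _ rfl]
      have hsplit := List.take_append_drop mid l
      have h1 := congrArg (List.count '(') hsplit
      have h2 := congrArg (List.count ')') hsplit
      simp only [List.count_append] at h1 h2
      push_cast [← h1, ← h2]
      ring

-- A's accumulator loop equals (count '(') - (count ')')
lemma loop_eq (cs : List Char) (k : Int) :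
    cs.foldl (fun floor c =>
      let floor := if c = '(' then floor + 1 else floor
      if c = ')' then floor - 1 else floor) k
    = k + (cs.count '(' : Int) - (cs.count ')' : Int) := by
  induction cs generalizing k with
  | nil => simp
  | cons x xs ih =>
    simp only [List.foldl_cons, List.count_cons, ih]
    by_cases h1 : x = '(' <;> by_cases h2 : x = ')' <;>
      simp [h1, h2] <;> ring

-- ===== VERDICT (by name: the statement is the Claim_ definition above) =====
theorem part1_spec : Claim_equal_part1 := by
  intro input _ _
  unfold Spec_part1 part1 part1_alt
  rw [loop_eq, part1Net_eq_counts]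
  ring
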